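-- pv_equiv track=rewrite | github.com/rodmur/hackerrank | matrixlayer.py | putshell
-- ===== SOURCE A (Python) =====
-- def putshell(i,j,m,n,A,strip):
--     s = 0
--
--     for k in range(i,m-i-1):
--         A[k][j] = strip[s]
--         s += 1
--     for k in range(j,n-j-1):
--         A[m-i-1][k] = strip[s]
--         s += 1
--     for k in range(m-i-1,i,-1):
--         A[k][n-j-1] = strip[s]
--         s += 1
--     for k in range(n-j-1,j,-1):
--         A[i][k] = strip[s]
--         s += 1
--
--     return A
-- ===== SOURCE B (Python) =====
-- def putshell(i, j, m, n, A, strip):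
--     # Per-cell closed form: each perimeter cell's strip index is computed directly
--     # (priority = last segment that writes it), and the matrix is rebuilt in one
--     # comprehension pass. NOTE: unlike A this does not mutate A in place; the
--     # equivalence is about the return value.
--     L1 = max(0, (m - i - 1) - i)   # left-column / right-column segment length
--     L2 = max(0, (n - j - 1) - j)   # bottom-row / top-row segment length
--
--     def pos(r, c):
--         if r == i and j < c <= n - j - 1:
--             return 2 * L1 + L2 + (n - j - 1 - c)          # top row (written last)
--         if c == n - j - 1 and i < r <= m - i - 1:
--             return L1 + L2 + (m - i - 1 - r)              # right column
--         if r == m - i - 1 and j <= c < n - j - 1: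
--             return L1 + (c - j)                           # bottom row
--         if c == j and i <= r < m - i - 1:
--             return r - i                                  # left column
--         return None
--
--     return [[strip[p] if (p := pos(r, c)) is not None else v
--              for c, v in enumerate(row)]
--             for r, row in enumerate(A)]
-- ===== Notes on version B (the rewrite author's own statement) =====
-- stated objective: alternative
-- what changed: B replaces A's four sequential in-place write loops with a running counter by a per-cell closed-form index function: the matrix is rebuilt in one comprehension, computing for each cell directly which strip position (if any) lands there, with branch priority encoding A's last-write-wins overlap rule; no mutation, no counter.
-- outside the precondition, e.g. on putshell(-1, -2, -1, -1, [[0, 1]], [100, 101, 102, 103]): A returns [[102, 103]], B returns [[0, 1]]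
import Mathlib
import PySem

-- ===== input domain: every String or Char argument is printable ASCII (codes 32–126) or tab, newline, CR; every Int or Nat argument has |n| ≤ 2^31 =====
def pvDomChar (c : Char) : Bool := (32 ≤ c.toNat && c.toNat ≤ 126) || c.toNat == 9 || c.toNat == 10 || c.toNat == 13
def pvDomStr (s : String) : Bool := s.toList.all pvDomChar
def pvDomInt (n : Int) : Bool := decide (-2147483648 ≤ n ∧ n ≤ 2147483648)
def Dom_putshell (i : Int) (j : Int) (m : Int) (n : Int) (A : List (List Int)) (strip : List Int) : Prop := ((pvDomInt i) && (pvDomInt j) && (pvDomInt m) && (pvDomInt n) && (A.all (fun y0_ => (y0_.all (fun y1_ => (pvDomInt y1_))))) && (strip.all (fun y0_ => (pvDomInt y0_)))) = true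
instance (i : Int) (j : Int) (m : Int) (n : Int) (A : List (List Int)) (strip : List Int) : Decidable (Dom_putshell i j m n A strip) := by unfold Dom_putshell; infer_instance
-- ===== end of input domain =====

-- B computes every perimeter cell's strip index by a closed formula and rebuilds the matrix
-- in one pass instead of A's four sequential write loops; same return value on Pre_.
-- NOTE: the Python A mutates the argument matrix in place and returns it; B does NOT mutate.
-- The equivalence proved here is about the returned value only.

-- ===== PORT A =====
-- shared primitive for the Python statement 'A[r][c] = v' (negative indices wrap, as in
-- Python; where Python raises IndexError the matrix is returned unchanged — those inputs
-- are excluded by Pre_putshell)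
def pvSetCell (A : List (List Int)) (r : Int) (c : Int) (v : Int) : List (List Int) :=
  match PySem.List.pyGet? A r with
  | none => A                    -- Python raises IndexError here (outside Pre_)
  | some row => PySem.List.pySetD A r (PySem.List.pySetD row c v)
       -- inner pySetD is a no-op when c is out of range; Python raises there (outside Pre_)

-- literal port of A: four loops over the same ranges, threading (matrix, s);
-- strip[s] is pyGetD (default only reachable where Python raises, outside Pre_)
def putshell (i : Int) (j : Int) (m : Int) (n : Int) (A : List (List Int)) (strip : List Int) : List (List Int) :=
  let st1 := (PySem.List.pyRange i (m - i - 1) 1).foldl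
      (fun (st : List (List Int) × Int) k =>
        (pvSetCell st.1 k j (PySem.List.pyGetD strip st.2 0), st.2 + 1)) (A, 0)
  let st2 := (PySem.List.pyRange j (n - j - 1) 1).foldl
      (fun (st : List (List Int) × Int) k =>
        (pvSetCell st.1 (m - i - 1) k (PySem.List.pyGetD strip st.2 0), st.2 + 1)) st1
  let st3 := (PySem.List.pyRange (m - i - 1) i (-1)).foldl
      (fun (st : List (List Int) × Int) k =>
        (pvSetCell st.1 k (n - j - 1) (PySem.List.pyGetD strip st.2 0), st.2 + 1)) st2
  let st4 := (PySem.List.pyRange (n - j - 1) j (-1)).foldl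
      (fun (st : List (List Int) × Int) k =>
        (pvSetCell st.1 i k (PySem.List.pyGetD strip st.2 0), st.2 + 1)) st3
  st4.1

-- ===== PORT B =====
-- literal port of Source B's helper pos(r, c): which strip index lands in cell (r, c), if any;
-- branch order = segment priority (later segments overwrite earlier ones)
def pvPos (i : Int) (j : Int) (m : Int) (n : Int) (r : Int) (c : Int) : Option Int :=
  let L1 := max 0 ((m - i - 1) - i)
  let L2 := max 0 ((n - j - 1) - j)
  if r = i ∧ j < c ∧ c ≤ n - j - 1 then some (2 * L1 + L2 + (n - j - 1 - c))
  else if c = n - j - 1 ∧ i < r ∧ r ≤ m - i - 1 then some (L1 + L2 + (m - i - 1 - r))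
  else if r = m - i - 1 ∧ j ≤ c ∧ c < n - j - 1 then some (L1 + (c - j))
  else if c = j ∧ i ≤ r ∧ r < m - i - 1 then some (r - i)
  else none

-- literal port of B: rebuild the matrix cell by cell via enumerate comprehensions;
-- strip[p] is pyGetD (default only reachable where the Python B raises, outside Pre_)
def putshell_alt (i : Int) (j : Int) (m : Int) (n : Int) (A : List (List Int)) (strip : List Int) : List (List Int) :=
  (PySem.List.enumerate A 0).map (fun rp =>
    (PySem.List.enumerate rp.2 0).map (fun cp =>
      match pvPos i j m n rp.1 cp.1 with
      | some p => PySem.List.pyGetD strip p 0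
      | none => cp.2))

-- ===== PRECONDITION & SPEC =====
-- all rows indexed by k in range(lo,hi) exist and are longer than column c (c ≥ 0)
def pvColOK (A : List (List Int)) (lo : Int) (hi : Int) (c : Int) : Prop :=
  0 ≤ c ∧ ∀ k ∈ PySem.List.pyRange lo hi 1, c < ((A.getD k.toNat []).length : Int)

-- Pre_ = exactly the shell accesses are in range with non-negative indices and the strip
-- is long enough, so the Python A returns without an IndexError. It also excludes the
-- rare inputs where A only returns thanks to Python's negative-index WRAPAROUND (i, j or
-- a shell index negative but within |length|) — there A's writes land in accidental cells
-- and B (which rebuilds untouched cells unchanged) need not match (see claim cites).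
def Pre_putshell (i : Int) (j : Int) (m : Int) (n : Int) (A : List (List Int)) (strip : List Int) : Prop :=
  (2 * (max 0 (m - 2*i - 1)) + 2 * (max 0 (n - 2*j - 1)) ≤ (strip.length : Int))
  ∧ (i < m - i - 1 →
      (0 ≤ i ∧ pvColOK A i (m - i - 1) j ∧ pvColOK A (i + 1) (m - i) (n - j - 1)))
  ∧ (j < n - j - 1 →
      (0 ≤ i ∧ 0 ≤ j ∧ 0 ≤ m - i - 1
        ∧ n - j - 1 ≤ ((A.getD (m - i - 1).toNat []).length : Int)
        ∧ n - j - 1 < ((A.getD i.toNat []).length : Int)))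

instance (i : Int) (j : Int) (m : Int) (n : Int) (A : List (List Int)) (strip : List Int) : Decidable (Pre_putshell i j m n A strip) := by
  unfold Pre_putshell pvColOK; infer_instance

def pvWitness_putshell : Int × Int × Int × Int × List (List Int) × List Int :=
  (0, 0, 3, 3, [[0,0,0],[0,0,0],[0,0,0]], [1,2,3,4,5,6,7,8])

def Spec_putshell (i : Int) (j : Int) (m : Int) (n : Int) (A : List (List Int)) (strip : List Int) (out : List (List Int)) : Prop := out = putshell_alt i j m n A strip
instance (i : Int) (j : Int) (m : Int) (n : Int) (A : List (List Int)) (strip : List Int) (out : List (List Int)) : Decidable (Spec_putshell i j m n A strip out) := by unfold Spec_putshell; infer_instance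

-- ===== CLAIM (what is proved, stated in full; the proofs are below) =====
def Claim_equal_putshell : Prop := ∀ (i : Int) (j : Int) (m : Int) (n : Int) (A : List (List Int)) (strip : List Int), Dom_putshell i j m n A strip → Pre_putshell i j m n A strip → Spec_putshell i j m n A strip (putshell i j m n A strip)

-- ===== LEMMAS AND PROOFS =====

-- the write list A performs, in order (proof-side view of A's four loops)
def pvCoords (i : Int) (j : Int) (m : Int) (n : Int) : List (Int × Int) :=
  ((PySem.List.pyRange i (m - i - 1) 1).map (fun k => (k, j)))
  ++ ((PySem.List.pyRange j (n - j - 1) 1).map (fun k => (m - i - 1, k)))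
  ++ ((PySem.List.pyRange (m - i - 1) i (-1)).map (fun k => (k, n - j - 1)))
  ++ ((PySem.List.pyRange (n - j - 1) j (-1)).map (fun k => (i, k)))

-- the counter-threading step function of A's loops
def pvPair (strip : List Int) (st : List (List Int) × Int) (p : Int × Int) : List (List Int) × Int :=
  (pvSetCell st.1 p.1 p.2 (PySem.List.pyGetD strip st.2 0), st.2 + 1)

-- position of the LAST occurrence of p in ws (none if absent)
def pvLastPos : List (Int × Int) → (Int × Int) → Option Int
  | [], _ => none
  | w :: ws, p => match pvLastPos ws p with
      | some t => some (t + 1)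
      | none => if w = p then some 0 else none

-- cell (r, c) of a matrix, 0 outside (only evaluated at in-range indices)
def pvCell (M : List (List Int)) (r : Nat) (c : Nat) : Int := (M.getD r []).getD c 0

-- the write target w is a valid non-negative index pair into M
def pvInB (M : List (List Int)) (w : Int × Int) : Prop :=
  0 ≤ w.1 ∧ w.1 < (M.length : Int) ∧ 0 ≤ w.2 ∧ w.2 < (((M.getD w.1.toNat []).length) : Int)

def pvShape (M : List (List Int)) : List Nat := M.map List.length

theorem pvGetD_set_self {α : Type} (l : List α) (k : Nat) (x d : α) (h : k < l.length) :
    (l.set k x).getD k d = x := by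
  rw [List.getD_eq_getElem?_getD, List.getElem?_set_self h]; rfl

theorem pvGetD_set_ne {α : Type} (l : List α) (k r : Nat) (x d : α) (h : r ≠ k) :
    (l.set k x).getD r d = l.getD r d := by
  rw [List.getD_eq_getElem?_getD, List.getElem?_set_ne (by omega), ← List.getD_eq_getElem?_getD]

theorem pvShape_getD (M : List (List Int)) (r : Nat) (h : r < M.length) :
    (pvShape M).getD r 0 = (M.getD r []).length := by
  unfold pvShape
  rw [List.getD_eq_getElem _ _ (by simpa using h), List.getElem_map, ← List.getD_eq_getElem _ _ h]

theorem pvRowExists (A : List (List Int)) (t : Nat) (c : Int) (hc : 0 ≤ c)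
    (h : c < ((A.getD t []).length : Int)) : t < A.length := by
  by_contra hlt
  rw [List.getD_eq_default _ _ (by omega)] at h
  simp at h; omega

theorem pvSetCell_eq (M : List (List Int)) (r c v : Int) (h : pvInB M (r, c)) :
    pvSetCell M r c v = M.set r.toNat ((M.getD r.toNat []).set c.toNat v) := by
  obtain ⟨h1, h2, h3, h4⟩ := h
  have hr : r.toNat < M.length := by omega
  unfold pvSetCell
  split
  · next heq =>
      rw [PySem.List.pyGet?_of_nonneg M h1, List.getElem?_eq_getElem hr] at heq
      exact absurd heq (by simp)
  · next row heq =>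
      rw [PySem.List.pyGet?_of_nonneg M h1, List.getElem?_eq_getElem hr] at heq
      have hrow : row = M[r.toNat] := by injection heq with hh; exact hh.symm
      rw [PySem.List.pySetD_of_nonneg _ _ h1, PySem.List.pySetD_of_nonneg _ _ h3]
      rw [hrow, List.getD_eq_getElem _ _ hr]

theorem pvShape_set (M : List (List Int)) (r c v : Int) (h : pvInB M (r, c)) :
    pvShape (pvSetCell M r c v) = pvShape M := by
  obtain ⟨h1, h2, h3, h4⟩ := h
  have hr : r.toNat < M.length := by omega
  rw [pvSetCell_eq M r c v ⟨h1, h2, h3, h4⟩]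
  unfold pvShape
  rw [List.map_set]
  apply List.ext_getElem
  · simp
  · intro t ht1 ht2
    by_cases hts : t = r.toNat
    · subst hts
      rw [List.getElem_set_self (by simpa using hr)]
      rw [List.length_set, List.getElem_map, ← List.getD_eq_getElem _ _ hr]
    · rw [List.getElem_set_ne (by omega)]

theorem pvInB_of_shape {M M' : List (List Int)} (hs : pvShape M = pvShape M') (w : Int × Int)
    (h : pvInB M w) : pvInB M' w := by
  obtain ⟨h1, h2, h3, h4⟩ := h
  have hl : M.length = M'.length := by
    have := congrArg List.length hs; simpa [pvShape] using this
  have hr : w.1.toNat < M.length := by omega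
  have hrows : (M.getD w.1.toNat []).length = (M'.getD w.1.toNat []).length := by
    rw [← pvShape_getD M _ hr, ← pvShape_getD M' _ (by omega), hs]
  exact ⟨h1, by omega, h3, by omega⟩

theorem pvCell_set (M : List (List Int)) (w : Int × Int) (v : Int) (h : pvInB M w)
    (r c : Nat) :
    pvCell (pvSetCell M w.1 w.2 v) r c =
      if w = ((r : Int), (c : Int)) then v else pvCell M r c := by
  obtain ⟨h1, h2, h3, h4⟩ := h
  have hr : w.1.toNat < M.length := by omega
  have hcw : w.2.toNat < (M.getD w.1.toNat []).length := by omega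
  rw [pvSetCell_eq M w.1 w.2 v ⟨h1, h2, h3, h4⟩]
  unfold pvCell
  by_cases he : w = ((r : Int), (c : Int))
  · have hw1 : w.1.toNat = r := by rw [he]; simp
    have hw2 : w.2.toNat = c := by rw [he]; simp
    rw [if_pos he, ← hw1, ← hw2]
    rw [pvGetD_set_self _ _ _ _ hr, pvGetD_set_self _ _ _ _ hcw]
  · rw [if_neg he]
    by_cases hrr : w.1.toNat = r
    · have hw1 : w.1 = (r : Int) := by omega
      have hcc : c ≠ w.2.toNat := by
        intro hx
        apply he
        have : w.2 = (c : Int) := by omega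
        cases w; simp_all
      rw [← hrr, pvGetD_set_self _ _ _ _ hr, pvGetD_set_ne _ _ _ _ _ hcc]
    · rw [pvGetD_set_ne _ _ _ _ _ (by omega)]

theorem pvFoldCell (strip : List Int) :
    ∀ (ws : List (Int × Int)) (M : List (List Int)) (s : Int),
      (∀ w ∈ ws, pvInB M w) →
      pvShape ((ws.foldl (pvPair strip) (M, s)).1) = pvShape M ∧
      ∀ (r c : Nat), pvCell ((ws.foldl (pvPair strip) (M, s)).1) r c =
        match pvLastPos ws ((r : Int), (c : Int)) with
        | some t => PySem.List.pyGetD strip (s + t) 0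
        | none => pvCell M r c := by
  intro ws
  induction ws with
  | nil => intro M s _; exact ⟨rfl, fun r c => by simp [pvLastPos]⟩
  | cons w ws ih =>
      intro M s hIB
      have hw : pvInB M w := hIB w (by simp)
      have hfold : (w :: ws).foldl (pvPair strip) (M, s)
          = ws.foldl (pvPair strip) (pvSetCell M w.1 w.2 (PySem.List.pyGetD strip s 0), s + 1) := rfl
      have hsh : pvShape (pvSetCell M w.1 w.2 (PySem.List.pyGetD strip s 0)) = pvShape M :=
        pvShape_set M w.1 w.2 _ (by exact hw)
      have hIB' : ∀ w' ∈ ws, pvInB (pvSetCell M w.1 w.2 (PySem.List.pyGetD strip s 0)) w' :=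
        fun w' hmem => pvInB_of_shape hsh.symm w' (hIB w' (by simp [hmem]))
      obtain ⟨ihs, ihc⟩ := ih _ (s + 1) hIB'
      constructor
      · rw [hfold, ihs, hsh]
      · intro r c
        rw [hfold, ihc r c]
        cases hlp : pvLastPos ws ((r : Int), (c : Int)) with
        | some t =>
            show PySem.List.pyGetD strip (s + 1 + t) 0
              = (match pvLastPos (w :: ws) ((r : Int), (c : Int)) with
                 | some t => PySem.List.pyGetD strip (s + t) 0
                 | none => pvCell M r c)
            have : pvLastPos (w :: ws) ((r : Int), (c : Int)) = some (t + 1) := by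
              simp [pvLastPos, hlp]
            rw [this]
            show PySem.List.pyGetD strip (s + 1 + t) 0 = PySem.List.pyGetD strip (s + (t + 1)) 0
            congr 1; ring
        | none =>
            rw [pvCell_set M w _ hw r c]
            have hlp2 : pvLastPos (w :: ws) ((r : Int), (c : Int))
                = if w = ((r : Int), (c : Int)) then some 0 else none := by
              simp [pvLastPos, hlp]
            rw [hlp2]
            by_cases he : w = ((r : Int), (c : Int))
            · rw [if_pos he, if_pos he]
              show PySem.List.pyGetD strip s 0 = PySem.List.pyGetD strip (s + 0) 0
              congr 1; ring
            · rw [if_neg he, if_neg he]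

-- A's program IS the fold of pvPair over pvCoords
theorem putshell_eq_fold (i j m n : Int) (A : List (List Int)) (strip : List Int) :
    putshell i j m n A strip = ((pvCoords i j m n).foldl (pvPair strip) (A, 0)).1 := by
  unfold putshell pvCoords
  simp only [List.foldl_append, List.foldl_map, pvPair]

-- pvLastPos over an append
theorem pvLastPos_append (xs ys : List (Int × Int)) (p : Int × Int) :
    pvLastPos (xs ++ ys) p =
      match pvLastPos ys p with
      | some t => some ((xs.length : Int) + t)
      | none => pvLastPos xs p := by
  induction xs with
  | nil => cases h : pvLastPos ys p <;> simp [pvLastPos, h]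
  | cons x xs ih =>
      show (match pvLastPos (xs ++ ys) p with
            | some t => some (t + 1)
            | none => if x = p then some 0 else none) = _
      rw [ih]
      cases h : pvLastPos ys p with
      | some t =>
          show some ((xs.length : Int) + t + 1) = some (((x :: xs).length : Int) + t)
          congr 1
          simp [List.length_cons]; push_cast; ring
      | none => rfl

-- the four segment shapes of pvLastPos
theorem pvLastPos_col_up (a b col : Int) (x y : Int) :
    pvLastPos ((PySem.List.pyRange a b 1).map (fun k => (k, col))) (x, y) =
      if y = col ∧ a ≤ x ∧ x < b then some (x - a) else none := by
  by_cases hab : b ≤ a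
  · rw [PySem.List.pyRange_one_eq_nil hab]
    simp only [List.map_nil]
    rw [if_neg (by omega)]
    rfl
  · push_neg at hab
    rw [PySem.List.pyRange_one_cons hab]
    simp only [List.map_cons]
    show (match pvLastPos ((PySem.List.pyRange (a+1) b 1).map (fun k => (k, col))) (x, y) with
          | some t => some (t + 1)
          | none => if (a, col) = (x, y) then some 0 else none) = _
    rw [pvLastPos_col_up (a+1) b col x y]
    by_cases h' : y = col ∧ a + 1 ≤ x ∧ x < b
    · rw [if_pos h', if_pos (show y = col ∧ a ≤ x ∧ x < b from ⟨h'.1, by omega, h'.2.2⟩)]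
      show some (x - (a + 1) + 1) = some (x - a)
      congr 1; ring
    · rw [if_neg h']
      by_cases he : (a, col) = (x, y)
      · have hx : a = x := congrArg Prod.fst he
        have hy : col = y := congrArg Prod.snd he
        rw [if_pos he, if_pos (show y = col ∧ a ≤ x ∧ x < b from ⟨hy.symm, by omega, by omega⟩)]
        show some 0 = some (x - a)
        congr 1; omega
      · rw [if_neg he, if_neg (by
          intro ⟨hh1, hh2, hh3⟩
          by_cases hxa : x = a
          · exact he (by rw [hxa, hh1])
          · exact h' ⟨hh1, by omega, hh3⟩)]
termination_by (b - a).toNat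
decreasing_by omega

theorem pvLastPos_row_up (a b row : Int) (x y : Int) :
    pvLastPos ((PySem.List.pyRange a b 1).map (fun k => (row, k))) (x, y) =
      if x = row ∧ a ≤ y ∧ y < b then some (y - a) else none := by
  by_cases hab : b ≤ a
  · rw [PySem.List.pyRange_one_eq_nil hab]
    simp only [List.map_nil]
    rw [if_neg (by omega)]
    rfl
  · push_neg at hab
    rw [PySem.List.pyRange_one_cons hab]
    simp only [List.map_cons]
    show (match pvLastPos ((PySem.List.pyRange (a+1) b 1).map (fun k => (row, k))) (x, y) with
          | some t => some (t + 1)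
          | none => if (row, a) = (x, y) then some 0 else none) = _
    rw [pvLastPos_row_up (a+1) b row x y]
    by_cases h' : x = row ∧ a + 1 ≤ y ∧ y < b
    · rw [if_pos h', if_pos (show x = row ∧ a ≤ y ∧ y < b from ⟨h'.1, by omega, h'.2.2⟩)]
      show some (y - (a + 1) + 1) = some (y - a)
      congr 1; ring
    · rw [if_neg h']
      by_cases he : (row, a) = (x, y)
      · have hx : row = x := congrArg Prod.fst he
        have hy : a = y := congrArg Prod.snd he
        rw [if_pos he, if_pos (show x = row ∧ a ≤ y ∧ y < b from ⟨hx.symm, by omega, by omega⟩)]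
        show some 0 = some (y - a)
        congr 1; omega
      · rw [if_neg he, if_neg (by
          intro ⟨hh1, hh2, hh3⟩
          by_cases hya : y = a
          · exact he (by rw [hh1, hya])
          · exact h' ⟨hh1, by omega, hh3⟩)]
termination_by (b - a).toNat
decreasing_by omega

theorem pvLastPos_col_down (a b col : Int) (x y : Int) :
    pvLastPos ((PySem.List.pyRange a b (-1)).map (fun k => (k, col))) (x, y) =
      if y = col ∧ b < x ∧ x ≤ a then some (a - x) else none := by
  by_cases hab : a ≤ b
  · rw [PySem.List.pyRange_neg_one_eq_nil hab]
    simp only [List.map_nil]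
    rw [if_neg (by omega)]
    rfl
  · push_neg at hab
    rw [PySem.List.pyRange_neg_one_cons hab]
    simp only [List.map_cons]
    show (match pvLastPos ((PySem.List.pyRange (a-1) b (-1)).map (fun k => (k, col))) (x, y) with
          | some t => some (t + 1)
          | none => if (a, col) = (x, y) then some 0 else none) = _
    rw [pvLastPos_col_down (a-1) b col x y]
    by_cases h' : y = col ∧ b < x ∧ x ≤ a - 1
    · rw [if_pos h', if_pos (show y = col ∧ b < x ∧ x ≤ a from ⟨h'.1, h'.2.1, by omega⟩)]
      show some (a - 1 - x + 1) = some (a - x)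
      congr 1; ring
    · rw [if_neg h']
      by_cases he : (a, col) = (x, y)
      · have hx : a = x := congrArg Prod.fst he
        have hy : col = y := congrArg Prod.snd he
        rw [if_pos he, if_pos (show y = col ∧ b < x ∧ x ≤ a from ⟨hy.symm, by omega, by omega⟩)]
        show some 0 = some (a - x)
        congr 1; omega
      · rw [if_neg he, if_neg (by
          intro ⟨hh1, hh2, hh3⟩
          by_cases hxa : x = a
          · exact he (by rw [hxa, hh1])
          · exact h' ⟨hh1, hh2, by omega⟩)]
termination_by (a - b).toNat
decreasing_by omega

theorem pvLastPos_row_down (a b row : Int) (x y : Int) :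
    pvLastPos ((PySem.List.pyRange a b (-1)).map (fun k => (row, k))) (x, y) =
      if x = row ∧ b < y ∧ y ≤ a then some (a - y) else none := by
  by_cases hab : a ≤ b
  · rw [PySem.List.pyRange_neg_one_eq_nil hab]
    simp only [List.map_nil]
    rw [if_neg (by omega)]
    rfl
  · push_neg at hab
    rw [PySem.List.pyRange_neg_one_cons hab]
    simp only [List.map_cons]
    show (match pvLastPos ((PySem.List.pyRange (a-1) b (-1)).map (fun k => (row, k))) (x, y) with
          | some t => some (t + 1)
          | none => if (row, a) = (x, y) then some 0 else none) = _
    rw [pvLastPos_row_down (a-1) b row x y]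
    by_cases h' : x = row ∧ b < y ∧ y ≤ a - 1
    · rw [if_pos h', if_pos (show x = row ∧ b < y ∧ y ≤ a from ⟨h'.1, h'.2.1, by omega⟩)]
      show some (a - 1 - y + 1) = some (a - y)
      congr 1; ring
    · rw [if_neg h']
      by_cases he : (row, a) = (x, y)
      · have hx : row = x := congrArg Prod.fst he
        have hy : a = y := congrArg Prod.snd he
        rw [if_pos he, if_pos (show x = row ∧ b < y ∧ y ≤ a from ⟨hx.symm, by omega, by omega⟩)]
        show some 0 = some (a - y)
        congr 1; omega
      · rw [if_neg he, if_neg (by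
          intro ⟨hh1, hh2, hh3⟩
          by_cases hya : y = a
          · exact he (by rw [hh1, hya])
          · exact h' ⟨hh1, hh2, by omega⟩)]
termination_by (a - b).toNat
decreasing_by omega

-- the closed form pvPos IS the last-write position in A's write list (pure arithmetic)
theorem pvLastPos_coords (i j m n x y : Int) :
    pvLastPos (pvCoords i j m n) (x, y) = pvPos i j m n x y := by
  unfold pvCoords pvPos
  rw [pvLastPos_append, pvLastPos_append, pvLastPos_append,
      pvLastPos_col_up, pvLastPos_row_up, pvLastPos_col_down, pvLastPos_row_down]
  simp only [List.length_map, PySem.List.length_pyRange_one, PySem.List.length_pyRange_neg_one]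
  split_ifs with h4 h3 h2 h1 <;> simp <;> omega

-- every write A performs lies in the matrix under Pre_
theorem pvInB_mk (A : List (List Int)) (a b : Int) (h1 : 0 ≤ a) (h2 : a < (A.length : Int))
    (h3 : 0 ≤ b) (h4 : b < ((A.getD a.toNat []).length : Int)) : pvInB A (a, b) :=
  ⟨h1, h2, h3, h4⟩

theorem pvPre_coords (i j m n : Int) (A : List (List Int)) (strip : List Int)
    (hpre : Pre_putshell i j m n A strip) :
    ∀ w ∈ pvCoords i j m n, pvInB A w := by
  obtain ⟨_, hcol, hrow⟩ := hpre
  intro w hw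
  unfold pvCoords at hw
  simp only [List.mem_append, List.mem_map] at hw
  rcases hw with ((⟨k, hk, rfl⟩ | ⟨k, hk, rfl⟩) | ⟨k, hk, rfl⟩) | ⟨k, hk, rfl⟩
  · -- left column, k in [i, m-i-1)
    rw [PySem.List.mem_pyRange_one] at hk
    obtain ⟨hi0, ⟨hj0, hcolj⟩, _⟩ := hcol (by omega)
    have hb := hcolj k (by rw [PySem.List.mem_pyRange_one]; omega)
    have hex := pvRowExists A k.toNat j hj0 hb
    exact pvInB_mk A k j (by omega) (by omega) hj0 hb
  · -- bottom row, col k in [j, n-j-1)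
    rw [PySem.List.mem_pyRange_one] at hk
    obtain ⟨hi0, hj0, hm0, hlen, _⟩ := hrow (by omega)
    have hex := pvRowExists A (m - i - 1).toNat j hj0 (by omega)
    exact pvInB_mk A (m - i - 1) k hm0 (by omega) (by omega) (by omega)
  · -- right column, k in (i, m-i-1]
    rw [PySem.List.mem_pyRange_neg_one] at hk
    obtain ⟨hi0, _, ⟨hc0, hcolc⟩⟩ := hcol (by omega)
    have hb := hcolc k (by rw [PySem.List.mem_pyRange_one]; omega)
    have hex := pvRowExists A k.toNat (n - j - 1) hc0 hb
    exact pvInB_mk A k (n - j - 1) (by omega) (by omega) hc0 hb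
  · -- top row, col k in (j, n-j-1]
    rw [PySem.List.mem_pyRange_neg_one] at hk
    obtain ⟨hi0, hj0, hm0, _, hlen⟩ := hrow (by omega)
    have hex := pvRowExists A i.toNat (n - j - 1) (by omega) hlen
    exact pvInB_mk A i k hi0 (by omega) (by omega) (by omega)

-- ===== VERDICT (by name: the statement is the Claim_ definition above) =====
theorem putshell_spec : Claim_equal_putshell := by
  intro i j m n A strip _ hpre
  unfold Spec_putshell
  rw [putshell_eq_fold]
  obtain ⟨hsh, hcell⟩ := pvFoldCell strip (pvCoords i j m n) A 0 (pvPre_coords i j m n A strip hpre)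
  have hlen : ((pvCoords i j m n).foldl (pvPair strip) (A, 0)).1.length = A.length := by
    have := congrArg List.length hsh; simpa [pvShape] using this
  have haltlen : (putshell_alt i j m n A strip).length = A.length := by
    simp [putshell_alt, PySem.List.length_enumerate]
  apply List.ext_getElem (by omega)
  intro r h1 h2
  have hrA : r < A.length := by omega
  have henum : r < (PySem.List.enumerate A 0).length := by
    rw [PySem.List.length_enumerate]; exact hrA
  have halt : (putshell_alt i j m n A strip)[r]'h2 =
      (PySem.List.enumerate (A[r]'hrA) 0).map (fun cp =>
        match pvPos i j m n (r : Int) cp.1 with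
        | some p => PySem.List.pyGetD strip p 0
        | none => cp.2) := by
    show ((PySem.List.enumerate A 0).map _)[r]'_ = _
    rw [List.getElem_map, PySem.List.getElem_enumerate A 0 r henum]
    simp
  have hrl : (((pvCoords i j m n).foldl (pvPair strip) (A, 0)).1[r]'h1).length = (A[r]'hrA).length := by
    have h := congrArg (fun l => l.getD r 0) hsh
    simp only [] at h
    rw [pvShape_getD _ _ (by omega), pvShape_getD _ _ hrA] at h
    rw [List.getD_eq_getElem _ _ (by omega), List.getD_eq_getElem _ _ hrA] at h
    exact h
  apply List.ext_getElem (by rw [halt]; simpa [PySem.List.length_enumerate] using hrl)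
  intro c hc1 hc2
  have hcA : c < (A[r]'hrA).length := by omega
  have hcenum : c < (PySem.List.enumerate (A[r]'hrA) 0).length := by
    rw [PySem.List.length_enumerate]; exact hcA
  have hrhs : ((putshell_alt i j m n A strip)[r]'h2)[c]'hc2 =
      (match pvPos i j m n (r : Int) (c : Int) with
       | some p => PySem.List.pyGetD strip p 0
       | none => (A[r]'hrA)[c]'hcA) := by
    simp only [halt, List.getElem_map]
    rw [PySem.List.getElem_enumerate _ 0 c hcenum]
    simp
  rw [hrhs]
  have hlhs : ((((pvCoords i j m n).foldl (pvPair strip) (A, 0)).1)[r]'h1)[c]'hc1 =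
      pvCell (((pvCoords i j m n).foldl (pvPair strip) (A, 0)).1) r c := by
    unfold pvCell
    rw [List.getD_eq_getElem _ _ (by omega : r < (((pvCoords i j m n).foldl (pvPair strip) (A, 0)).1).length)]
    rw [List.getD_eq_getElem]
  rw [hlhs, hcell r c, pvLastPos_coords]
  cases hp : pvPos i j m n (r : Int) (c : Int) with
  | some p =>
      show PySem.List.pyGetD strip (0 + p) 0 = PySem.List.pyGetD strip p 0
      rw [zero_add]
  | none =>
      show pvCell A r c = (A[r]'hrA)[c]'hcA
      unfold pvCell
      rw [List.getD_eq_getElem _ _ hrA, List.getD_eq_getElem]
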